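-- pv_equiv track=rewrite | github.com/TheDeepLogic/Applesoft-BASIC-Interpreter | applesoft.py | split_on_colon
-- ===== SOURCE A (Python) =====
-- from typing import Any, Dict, List, Optional, Tuple, Union
--
-- def split_on_colon(statement: str) -> List[str]:
--     """Split statement on colons, but not inside strings or as part of HIMEM:/LOMEM: syntax"""
--     parts = []
--     current = []
--     in_string = False
--     i = 0
--
--     while i < len(statement):
--         char = statement[i]
--
--         if char == '"':
--             in_string = not in_string
--             current.append(char)
--             i += 1
--         elif char == ':' and not in_string:
--             # Check if this is part of HIMEM: or LOMEM: syntax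
--             current_str = ''.join(current).upper().strip()
--             if current_str.endswith('HIMEM') or current_str.endswith('LOMEM'):
--                 # This colon is part of the command syntax, not a separator
--                 current.append(char)
--                 i += 1
--             else:
--                 # This is a statement separator
--                 parts.append(''.join(current))
--                 current = []
--                 i += 1
--         else:
--             current.append(char)
--             i += 1
--
--     if current:
--         parts.append(''.join(current))
--
--     return parts
-- ===== SOURCE B (Python) =====
-- def split_on_colon(statement: str):
--     """Split statement on colons, but not inside strings or as part of HIMEM:/LOMEM: syntax.
--     Instead of re-joining and upper/strip/endswith-scanning the whole current segment at
--     every colon, keep a rolling uppercased 5-char suffix of the segment (with trailing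
--     whitespace held back in `pend`) and compare it directly."""
--     parts = []
--     current = []
--     in_string = False
--     tail = ''   # uppercased last <=5 chars of current with trailing whitespace removed
--     pend = ''   # trailing whitespace of current, not yet committed to tail
--     for ch in statement:
--         if ch == ':' and not in_string and tail != 'HIMEM' and tail != 'LOMEM':
--             parts.append(''.join(current))
--             current = []
--             tail = ''
--             pend = ''
--         else:
--             if ch == '"':
--                 in_string = not in_string
--             current.append(ch)
--             if ch.isspace():
--                 pend += ch
--             else:
--                 tail = (tail + pend + ch.upper())[-5:]
--                 pend = ''
--     if current:
--         parts.append(''.join(current))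
--     return parts
-- ===== Notes on version B (the rewrite author's own statement) =====
-- stated objective: alternative
-- what changed: Instead of re-joining the whole current segment and running upper/strip/endswith on it at every colon, B maintains a rolling uppercased last-5-character suffix of the segment (trailing whitespace held back) and decides the HIMEM:/LOMEM: case by a direct string comparison.
import Mathlib
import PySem

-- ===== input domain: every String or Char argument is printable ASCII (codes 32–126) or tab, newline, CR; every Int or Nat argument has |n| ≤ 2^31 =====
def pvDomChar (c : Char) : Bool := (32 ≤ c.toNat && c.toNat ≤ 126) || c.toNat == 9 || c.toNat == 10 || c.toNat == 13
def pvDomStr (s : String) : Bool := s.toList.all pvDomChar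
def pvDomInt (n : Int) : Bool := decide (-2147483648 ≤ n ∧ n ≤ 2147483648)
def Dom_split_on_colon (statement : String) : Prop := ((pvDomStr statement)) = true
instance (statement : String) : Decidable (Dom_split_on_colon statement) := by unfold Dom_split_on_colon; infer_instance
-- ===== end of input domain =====

-- B replaces A's per-colon re-join and upper/strip/endswith scan of the current segment
-- by a rolling uppercased 5-character suffix of the segment, maintained incrementally
-- with trailing whitespace held back (objective: alternative).

-- shared literal constants ('HIMEM' / 'LOMEM')
def himemL : List Char := ['H', 'I', 'M', 'E', 'M']
def lomemL : List Char := ['L', 'O', 'M', 'E', 'M']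

-- ===== PORT A =====
-- current_str = ''.join(current).upper().strip(); endswith('HIMEM') or endswith('LOMEM')
def aCheck (cur : List Char) : Bool :=
  let s := PySem.Chars.strip (PySem.Chars.upper cur)
  PySem.Chars.endswith s himemL || PySem.Chars.endswith s lomemL

def aLoop : List Char → List String → List Char → Bool → List String
  | [], parts, cur, _ => if cur = [] then parts else parts ++ [String.ofList cur]
  | c :: rest, parts, cur, instr =>
    if c = '"' then aLoop rest parts (cur ++ [c]) (!instr)
    else if c = ':' ∧ instr = false then
      if aCheck cur then aLoop rest parts (cur ++ [c]) instr
      else aLoop rest (parts ++ [String.ofList cur]) [] instr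
    else aLoop rest parts (cur ++ [c]) instr

def split_on_colon (statement : String) : List String :=
  aLoop statement.toList [] [] false

-- ===== PORT B =====
-- (tail + pend + ch.upper())[-5:]
def bTail (tail pend : List Char) (c : Char) : List Char :=
  PySem.Chars.slice (tail ++ pend ++ [c]) (some (-5)) none

def bLoop : List Char → List String → List Char → List Char → List Char → Bool → List String
  | [], parts, cur, _, _, _ => if cur = [] then parts else parts ++ [String.ofList cur]
  | c :: rest, parts, cur, tail, pend, instr =>
    if c = ':' ∧ instr = false ∧ tail ≠ himemL ∧ tail ≠ lomemL then
      bLoop rest (parts ++ [String.ofList cur]) [] [] [] instr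
    else
      let instr' := if c = '"' then !instr else instr
      if PySem.Chars.isspace c then
        bLoop rest parts (cur ++ [c]) tail (pend ++ [c]) instr'
      else
        bLoop rest parts (cur ++ [c]) (bTail tail pend (PySem.Chars.upperChar c)) [] instr'

def split_on_colon_alt (statement : String) : List String :=
  bLoop statement.toList [] [] [] [] false


-- ===== PRECONDITION & SPEC =====
def Spec_split_on_colon (statement : String) (out : List String) : Prop := out = split_on_colon_alt statement
instance (statement : String) (out : List String) : Decidable (Spec_split_on_colon statement out) := by unfold Spec_split_on_colon; infer_instance

-- ===== CLAIM (what is proved, stated in full; the proofs are below) =====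
def Claim_equal_split_on_colon : Prop := ∀ (statement : String), Dom_split_on_colon statement → Spec_split_on_colon statement (split_on_colon statement)

-- ===== LEMMAS AND PROOFS =====

-- tail5 l is the last-5-characters suffix that Source B's rolling `tail` variable maintains
def tail5 (l : List Char) : List Char := l.drop (l.length - 5)
theorem tail5_of_short (l : List Char) (h : l.length ≤ 5) : tail5 l = l := by
  unfold tail5
  rw [show l.length - 5 = 0 from by omega]
  simp
theorem tail5_append_right (a b : List Char) (h : 5 ≤ b.length) :
    tail5 (a ++ b) = tail5 b := by
  unfold tail5
  rw [List.length_append, show a.length + b.length - 5 = a.length + (b.length - 5) from by omega,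
    List.drop_append, List.drop_eq_nil_of_le (by omega),
    show a.length + (b.length - 5) - a.length = b.length - 5 from by omega]
  simp
theorem tail5_absorb (x y : List Char) :
    tail5 (tail5 x ++ y) = tail5 (x ++ y) := by
  by_cases hx : x.length ≤ 5
  · rw [tail5_of_short x hx]
  · have hlen : (tail5 x).length = 5 := by unfold tail5; rw [List.length_drop]; omega
    have h2 : tail5 (x ++ y) = tail5 (tail5 x ++ y) := by
      conv_lhs => rw [show x = x.take (x.length - 5) ++ tail5 x from (List.take_append_drop _ _).symm,
        List.append_assoc]
      exact tail5_append_right _ _ (by rw [List.length_append, hlen]; omega)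
    rw [h2]

theorem suffix5_iff (p z : List Char) (hp : p.length = 5) :
    p <:+ z ↔ tail5 z = p := by
  constructor
  · rintro ⟨a, rfl⟩
    unfold tail5
    rw [List.length_append, show a.length + p.length - 5 = a.length from by omega, List.drop_append,
      List.drop_eq_nil_of_le (le_refl _), show a.length - a.length = 0 from by omega]
    simp
  · intro h
    have hs : tail5 z <:+ z := List.drop_suffix _ _
    rw [h] at hs; exact hs

theorem isspace_upperChar (c : Char) :
    PySem.Chars.isspace (PySem.Chars.upperChar c) = PySem.Chars.isspace c := by
  unfold PySem.Chars.upperChar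
  by_cases hl : PySem.Chars.islower c = true
  · have hc : 97 ≤ c.toNat ∧ c.toNat ≤ 122 := by
      revert hl; unfold PySem.Chars.islower
      simp only [Bool.and_eq_true, decide_eq_true_eq, Char.le_def, UInt32.le_iff_toNat_le, Char.toNat]
      intro h
      have h1 : 'a'.val.toNat = 97 := by decide
      have h2 : 'z'.val.toNat = 122 := by decide
      omega
    have hv : (Char.ofNat (c.toNat - 32)).toNat = c.toNat - 32 := by
      rw [Char.toNat_ofNat, if_pos (Or.inl (by omega))]
    simp only [hl, if_true]
    have h1 : PySem.Chars.isspace (Char.ofNat (c.toNat - 32)) = false := by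
      unfold PySem.Chars.isspace
      simp only [Bool.or_eq_false_iff, Bool.and_eq_false_iff, decide_eq_false_iff_not, hv]
      omega
    have h2 : PySem.Chars.isspace c = false := by
      unfold PySem.Chars.isspace
      simp only [Bool.or_eq_false_iff, Bool.and_eq_false_iff, decide_eq_false_iff_not]
      omega
    rw [h1, h2]
  · simp [hl]

theorem ws_upperChar (c : Char) (h : PySem.Chars.isspace c = true) :
    PySem.Chars.upperChar c = c := by
  unfold PySem.Chars.upperChar
  have hl : PySem.Chars.islower c = false := by
    revert h
    unfold PySem.Chars.isspace PySem.Chars.islower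
    simp only [Bool.or_eq_true, Bool.and_eq_true, decide_eq_true_eq,
      Bool.and_eq_false_iff, decide_eq_false_iff_not, Char.le_def, UInt32.le_iff_toNat_le, Char.toNat]
    intro h
    have h1 : 'a'.val.toNat = 97 := by decide
    have h2 : 'z'.val.toNat = 122 := by decide
    omega
  simp [hl]

theorem upper_ws (l : List Char) (h : ∀ x ∈ l, PySem.Chars.isspace x = true) :
    PySem.Chars.upper l = l := by
  unfold PySem.Chars.upper
  have he : List.map PySem.Chars.upperChar l = List.map id l :=
    List.map_congr_left (fun x hx => ws_upperChar x (h x hx))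
  simpa using he

theorem rstrip_eq_nil_iff (l : List Char) :
    PySem.Chars.rstrip l = [] ↔ ∀ x ∈ l, PySem.Chars.isspace x = true := by
  unfold PySem.Chars.rstrip
  rw [List.reverse_eq_nil_iff, List.dropWhile_eq_nil_iff]
  constructor <;> intro h x hx <;> exact h x (by simpa using hx)

theorem rstrip_append_nonws (l : List Char) (c : Char) (h : PySem.Chars.isspace c = false) :
    PySem.Chars.rstrip (l ++ [c]) = l ++ [c] := by
  unfold PySem.Chars.rstrip
  simp [List.dropWhile_cons, h]

theorem rstrip_append_ws (l : List Char) (c : Char) (h : PySem.Chars.isspace c = true) :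
    PySem.Chars.rstrip (l ++ [c]) = PySem.Chars.rstrip l := by
  unfold PySem.Chars.rstrip
  simp [List.dropWhile_cons, h]

theorem rstrip_append_left (w v : List Char) (h : PySem.Chars.rstrip v ≠ []) :
    PySem.Chars.rstrip (w ++ v) = w ++ PySem.Chars.rstrip v := by
  unfold PySem.Chars.rstrip at *
  rw [List.reverse_append, List.dropWhile_append]
  have hne : (v.reverse.dropWhile PySem.Chars.isspace).isEmpty = false := by
    rw [List.isEmpty_eq_false_iff]
    intro hc
    rw [hc] at h; simp at h
  simp [hne]

theorem rstrip_upper (l : List Char) :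
    PySem.Chars.rstrip (PySem.Chars.upper l) = PySem.Chars.upper (PySem.Chars.rstrip l) := by
  unfold PySem.Chars.rstrip PySem.Chars.upper
  rw [← List.map_reverse, List.dropWhile_map,
    show (PySem.Chars.isspace ∘ PySem.Chars.upperChar) = PySem.Chars.isspace from
      funext fun c => isspace_upperChar c, ← List.map_reverse]

theorem rstrip_dropWhile_ne_nil (S : List Char) (h : S.dropWhile PySem.Chars.isspace ≠ []) :
    PySem.Chars.rstrip (S.dropWhile PySem.Chars.isspace) ≠ [] := by
  intro hc
  rw [rstrip_eq_nil_iff] at hc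
  have hhd := List.head_dropWhile_not PySem.Chars.isspace h
  have hmem := hc _ (List.head_mem h)
  rw [hmem] at hhd
  simp at hhd

theorem endswith_strip_iff (S p : List Char) (hp : p.length = 5)
    (hpw : ∀ x ∈ p, PySem.Chars.isspace x = false) :
    PySem.Chars.endswith (PySem.Chars.strip S) p = true ↔ tail5 (PySem.Chars.rstrip S) = p := by
  rw [PySem.Chars.endswith_iff]
  unfold PySem.Chars.strip PySem.Chars.lstrip
  have hS : S = S.takeWhile PySem.Chars.isspace ++ S.dropWhile PySem.Chars.isspace :=
    (List.takeWhile_append_dropWhile).symm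
  set w := S.takeWhile PySem.Chars.isspace with hw
  set v := S.dropWhile PySem.Chars.isspace with hv
  have hwws : ∀ x ∈ w, PySem.Chars.isspace x = true := fun x hx => List.mem_takeWhile_imp hx
  by_cases hvnil : v = []
  · rw [hvnil]
    have h1 : PySem.Chars.rstrip S = [] := by
      rw [rstrip_eq_nil_iff]
      intro x hx
      rw [hS, hvnil, List.append_nil] at hx
      exact hwws x hx
    rw [h1, show PySem.Chars.rstrip ([] : List Char) = [] from rfl,
      show tail5 ([] : List Char) = [] from rfl, List.suffix_nil]
    have hpne : p ≠ [] := by intro hc; rw [hc] at hp; simp at hp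
    constructor
    · intro h; exact absurd h hpne
    · intro h; exact absurd h.symm hpne
  · have hrv : PySem.Chars.rstrip v ≠ [] := by
      rw [hv]
      exact rstrip_dropWhile_ne_nil S (hv ▸ hvnil)
    have hrS : PySem.Chars.rstrip S = w ++ PySem.Chars.rstrip v := by
      conv_lhs => rw [hS]
      exact rstrip_append_left w v hrv
    rw [hrS, suffix5_iff p (PySem.Chars.rstrip v) hp]
    by_cases hlen : 5 ≤ (PySem.Chars.rstrip v).length
    · rw [tail5_append_right _ _ hlen]
    · push_neg at hlen
      rw [tail5_of_short _ (by omega)]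
      constructor
      · intro h
        exfalso
        have : (PySem.Chars.rstrip v).length = 5 := by rw [h, hp]
        omega
      · intro h
        exfalso
        have hsuf : p <:+ w ++ PySem.Chars.rstrip v := by
          rw [suffix5_iff p _ hp]; exact h
        have hsuf2 : PySem.Chars.rstrip v <:+ w ++ PySem.Chars.rstrip v := List.suffix_append _ _
        have hrvp : PySem.Chars.rstrip v <:+ p := by
          rcases List.suffix_or_suffix_of_suffix hsuf hsuf2 with h1 | h2
          · exfalso; have := h1.length_le; omega
          · exact h2
        obtain ⟨q, hq⟩ := hrvp
        have hqne : q ≠ [] := by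
          intro hc; rw [hc, List.nil_append] at hq; rw [← hq] at hp; omega
        obtain ⟨a, ha⟩ := hsuf
        rw [← hq, ← List.append_assoc] at ha
        have haq : a ++ q = w := List.append_cancel_right ha
        obtain ⟨x, hxq⟩ := List.exists_mem_of_ne_nil q hqne
        have hxw : x ∈ w := by rw [← haq]; simp [hxq]
        have hxp : x ∈ p := by rw [← hq]; simp [hxq]
        have h1 := hwws x hxw
        rw [hpw x hxp] at h1; simp at h1

theorem isspace_false_of_toNat (c : Char) (h1 : 33 ≤ c.toNat) (h2 : c.toNat ≤ 126) :
    PySem.Chars.isspace c = false := by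
  unfold PySem.Chars.isspace
  simp only [Bool.or_eq_false_iff, Bool.and_eq_false_iff, decide_eq_false_iff_not]
  omega

theorem hp_himem : ∀ x ∈ himemL, PySem.Chars.isspace x = false := by
  intro x hx
  fin_cases hx <;> exact isspace_false_of_toNat _ (by decide) (by decide)

theorem hp_lomem : ∀ x ∈ lomemL, PySem.Chars.isspace x = false := by
  intro x hx
  fin_cases hx <;> exact isspace_false_of_toNat _ (by decide) (by decide)

theorem check_iff (cur : List Char) :
    aCheck cur = true ↔
      tail5 (PySem.Chars.upper (PySem.Chars.rstrip cur)) = himemL ∨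
      tail5 (PySem.Chars.upper (PySem.Chars.rstrip cur)) = lomemL := by
  unfold aCheck
  rw [Bool.or_eq_true,
    endswith_strip_iff _ himemL rfl hp_himem,
    endswith_strip_iff _ lomemL rfl hp_lomem,
    rstrip_upper]

theorem bTail_eq (t pend : List Char) (c : Char) :
    bTail t pend c = tail5 (t ++ pend ++ [c]) := by
  unfold bTail tail5
  rw [PySem.Chars.slice_eq_listSlice]
  rw [PySem.List.slice_from_neg_ofNat _ 5 (by omega)]

theorem commit_tail (cur pend : List Char) (c : Char)
    (hpend : ∀ x ∈ pend, PySem.Chars.isspace x = true)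
    (hinv : cur = PySem.Chars.rstrip cur ++ pend)
    (hc : PySem.Chars.isspace c = false) :
    bTail (tail5 (PySem.Chars.upper (PySem.Chars.rstrip cur))) pend (PySem.Chars.upperChar c)
      = tail5 (PySem.Chars.upper (PySem.Chars.rstrip (cur ++ [c]))) := by
  rw [bTail_eq, rstrip_append_nonws _ _ hc]
  have hup : PySem.Chars.upper (cur ++ [c])
      = PySem.Chars.upper (PySem.Chars.rstrip cur) ++ pend ++ [PySem.Chars.upperChar c] := by
    conv_lhs => rw [hinv]
    unfold PySem.Chars.upper
    rw [List.map_append, List.map_append]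
    rw [show List.map PySem.Chars.upperChar pend = pend from upper_ws pend hpend]
    simp
  rw [hup, List.append_assoc, List.append_assoc, tail5_absorb]

theorem loop_eq (l : List Char) : ∀ (parts : List String) (cur pend : List Char) (instr : Bool),
    (∀ x ∈ pend, PySem.Chars.isspace x = true) →
    cur = PySem.Chars.rstrip cur ++ pend →
    bLoop l parts cur (tail5 (PySem.Chars.upper (PySem.Chars.rstrip cur))) pend instr
      = aLoop l parts cur instr := by
  induction l with
  | nil => intro parts cur pend instr _ _; rfl
  | cons c rest ih =>
    intro parts cur pend instr hpend hinv
    by_cases hq : c = '"'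
    · subst hq
      have hqws : PySem.Chars.isspace '"' = false := isspace_false_of_toNat _ (by decide) (by decide)
      rw [aLoop, if_pos rfl, bLoop, if_neg (by simp)]
      simp only [if_pos rfl, hqws, Bool.false_eq_true, if_false]
      rw [commit_tail cur pend '"' hpend hinv hqws]
      exact ih parts (cur ++ ['"']) [] (!instr) (by simp)
        (by rw [rstrip_append_nonws _ _ hqws]; simp)
    · by_cases hcolon : c = ':' ∧ instr = false
      · obtain ⟨hc, hi⟩ := hcolon; subst hc; subst hi
        rw [aLoop, if_neg (show ¬(':' : Char) = '"' by decide),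
          if_pos (show (':' : Char) = ':' ∧ (false : Bool) = false from ⟨rfl, rfl⟩)]
        by_cases hchk : aCheck cur = true
        · rw [if_pos hchk]
          rw [check_iff] at hchk
          rw [bLoop, if_neg (by rintro ⟨-, -, h1, h2⟩; exact hchk.elim (fun h => h1 h) (fun h => h2 h))]
          have hcws : PySem.Chars.isspace ':' = false := isspace_false_of_toNat _ (by decide) (by decide)
          simp only [if_neg (show ¬(':' : Char) = '"' by decide), hcws, Bool.false_eq_true, if_false]
          rw [commit_tail cur pend ':' hpend hinv hcws]
          exact ih parts (cur ++ [':']) [] false (by simp)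
            (by rw [rstrip_append_nonws _ _ hcws]; simp)
        · rw [if_neg hchk]
          rw [check_iff] at hchk
          push_neg at hchk
          rw [bLoop, if_pos ⟨rfl, rfl, hchk.1, hchk.2⟩]
          have h0 : ([] : List Char) = tail5 (PySem.Chars.upper (PySem.Chars.rstrip [])) := rfl
          rw [h0]
          exact ih (parts ++ [String.ofList cur]) [] [] false (by simp)
            (by simp [PySem.Chars.rstrip])
      · rw [aLoop, if_neg hq, if_neg hcolon]
        rw [bLoop, if_neg (by rintro ⟨h1, h2, -, -⟩; exact hcolon ⟨h1, h2⟩)]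
        simp only [if_neg hq]
        by_cases hws : PySem.Chars.isspace c = true
        · simp only [hws, if_true]
          have hr : PySem.Chars.rstrip (cur ++ [c]) = PySem.Chars.rstrip cur :=
            rstrip_append_ws _ _ hws
          rw [← hr]
          refine ih parts (cur ++ [c]) (pend ++ [c]) instr ?_ ?_
          · intro x hx
            rcases List.mem_append.mp hx with h | h
            · exact hpend x h
            · rw [List.mem_singleton.mp h]; exact hws
          · rw [hr]; conv_lhs => rw [hinv]
            rw [List.append_assoc]
        · simp only [hws, if_false]
          rw [commit_tail cur pend c hpend hinv (by simpa using hws)]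
          exact ih parts (cur ++ [c]) [] instr (by simp)
            (by rw [rstrip_append_nonws _ _ (by simpa using hws)]; simp)


-- ===== VERDICT (by name: the statement is the Claim_ definition above) =====
theorem split_on_colon_spec : Claim_equal_split_on_colon := by
  intro statement _
  unfold Spec_split_on_colon split_on_colon split_on_colon_alt
  have h := loop_eq statement.toList [] [] [] false (by simp) (by simp [PySem.Chars.rstrip])
  have h0 : tail5 (PySem.Chars.upper (PySem.Chars.rstrip [])) = [] := rfl
  rw [h0] at h
  exact h.symm
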